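-- pv_equiv track=rewrite | github.com/brahim-elkhobzi/AI-AGENT-FOR-Education | utils/math_solver.py | detect_math_domain
-- ===== SOURCE A (Python) =====
-- def detect_math_domain(problem_text):
--     """Simple heuristic to detect math domain based on keywords"""
--     problem_text = problem_text.lower()
--
--     if any(kw in problem_text for kw in ["derivative", "integral", "differentiate", "integrate", "limit"]):
--         return "calculus"
--     elif any(kw in problem_text for kw in ["matrix", "vector", "linear", "determinant", "eigenvalue", "eigenvector", "span"]):
--         return "linear_algebra"
--     elif any(kw in problem_text for kw in ["probability", "distribution", "random", "variance", "standard deviation", "mean", "median", "hypothesis"]):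
--         return "statistics"
--     elif any(kw in problem_text for kw in ["differential equation", "ode", "pde", "solve for y", "d/dx", "∂/∂t"]):
--         return "differential_equations"
--     else:
--         return "general"
-- ===== SOURCE B (Python) =====
-- _LABELS = ["calculus", "linear_algebra", "statistics", "differential_equations"]
--
-- _KEYWORDS = (
--     [(kw, 0) for kw in ["derivative", "integral", "differentiate", "integrate", "limit"]]
--     + [(kw, 1) for kw in ["matrix", "vector", "linear", "determinant", "eigenvalue", "eigenvector", "span"]]
--     + [(kw, 2) for kw in ["probability", "distribution", "random", "variance", "standard deviation", "mean", "median", "hypothesis"]]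
--     + [(kw, 3) for kw in ["differential equation", "ode", "pde", "solve for y", "d/dx", "\u2202/\u2202t"]]
-- )
--
-- def detect_math_domain(problem_text):
--     # Single flat pass: track the best (smallest) priority among ALL matching
--     # keywords, then map that priority to its label; no short-circuit chain.
--     text = problem_text.lower()
--     best = None
--     for kw, pri in _KEYWORDS:
--         if kw in text:
--             best = pri if best is None else min(best, pri)
--     return "general" if best is None else _LABELS[best]
-- ===== Notes on version B (the rewrite author's own statement) =====
-- stated objective: alternative
-- what changed: Instead of an ordered if/elif chain of per-domain any() tests with first-match-wins, B makes one flat pass over all (keyword, priority) pairs, accumulating the minimum matching priority, and maps that priority to its label (none -> 'general'); priority order encodes A's precedence.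
import Mathlib
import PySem

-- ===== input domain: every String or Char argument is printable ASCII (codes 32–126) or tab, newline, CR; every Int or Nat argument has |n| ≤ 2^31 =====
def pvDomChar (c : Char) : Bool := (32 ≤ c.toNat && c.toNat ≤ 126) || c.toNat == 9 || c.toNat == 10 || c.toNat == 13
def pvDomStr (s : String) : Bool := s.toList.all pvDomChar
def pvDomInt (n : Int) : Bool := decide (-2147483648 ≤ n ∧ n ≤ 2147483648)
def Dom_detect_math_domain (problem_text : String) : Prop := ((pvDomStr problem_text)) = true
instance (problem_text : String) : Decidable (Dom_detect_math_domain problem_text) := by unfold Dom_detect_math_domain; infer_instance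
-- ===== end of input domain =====

-- B replaces A's ordered if/elif chain by one flat min-priority scan over all (keyword, priority) pairs (alternative decomposition, same behaviour).


-- ===== PORT A =====
def detect_math_domain (problem_text : String) : String :=
  let t := PySem.Str.lower problem_text
  if ["derivative", "integral", "differentiate", "integrate", "limit"].any
      (fun kw => PySem.Str.isIn kw t) then "calculus"
  else if ["matrix", "vector", "linear", "determinant", "eigenvalue", "eigenvector", "span"].any
      (fun kw => PySem.Str.isIn kw t) then "linear_algebra"
  else if ["probability", "distribution", "random", "variance", "standard deviation", "mean", "median", "hypothesis"].any
      (fun kw => PySem.Str.isIn kw t) then "statistics"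
  else if ["differential equation", "ode", "pde", "solve for y", "d/dx", "∂/∂t"].any
      (fun kw => PySem.Str.isIn kw t) then "differential_equations"
  else "general"

-- ===== PORT B =====
def pvLabels : List String := ["calculus", "linear_algebra", "statistics", "differential_equations"]

def pvKeywords : List (String × Nat) :=
  (["derivative", "integral", "differentiate", "integrate", "limit"].map (fun kw => (kw, 0)))
  ++ (["matrix", "vector", "linear", "determinant", "eigenvalue", "eigenvector", "span"].map (fun kw => (kw, 1)))
  ++ (["probability", "distribution", "random", "variance", "standard deviation", "mean", "median", "hypothesis"].map (fun kw => (kw, 2)))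
  ++ (["differential equation", "ode", "pde", "solve for y", "d/dx", "∂/∂t"].map (fun kw => (kw, 3)))

-- loop body: keep the smallest priority among matching keywords
def pvStep (t : String) (best : Option Nat) (e : String × Nat) : Option Nat :=
  if PySem.Str.isIn e.1 t then
    some (match best with | none => e.2 | some b => min b e.2)
  else best

def detect_math_domain_alt (problem_text : String) : String :=
  let t := PySem.Str.lower problem_text
  match pvKeywords.foldl (pvStep t) none with
  | none => "general"
  | some b => pvLabels.getD b "general"  -- index is always 0..3, so getD never defaults

-- ===== PRECONDITION & SPEC =====
def Spec_detect_math_domain (problem_text : String) (out : String) : Prop := out = detect_math_domain_alt problem_text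
instance (problem_text : String) (out : String) : Decidable (Spec_detect_math_domain problem_text out) := by unfold Spec_detect_math_domain; infer_instance

-- ===== CLAIM (what is proved, stated in full; the proofs are below) =====
def Claim_equal_detect_math_domain : Prop := ∀ (problem_text : String), Dom_detect_math_domain problem_text → Spec_detect_math_domain problem_text (detect_math_domain problem_text)

-- ===== LEMMAS AND PROOFS =====

def pvMinOpt (a : Option Nat) (p : Nat) : Nat :=
  match a with | none => p | some b => min b p

-- folding one constant-priority group: result is `some (pvMinOpt a p)` iff some keyword of the group matches
theorem pvFold_group (t : String) (p : Nat) (g : List String) (a : Option Nat) :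
    List.foldl (pvStep t) a (g.map (fun kw => (kw, p)))
      = if g.any (fun kw => PySem.Str.isIn kw t) then some (pvMinOpt a p) else a := by
  induction g generalizing a with
  | nil => simp
  | cons kw rest ih =>
    simp only [List.map_cons, List.foldl_cons, List.any_cons, pvStep]
    by_cases h : PySem.Str.isIn kw t = true
    · rw [if_pos h, ih]
      simp only [h, Bool.true_or, if_true]
      cases a <;> simp [pvMinOpt]
    · rw [if_neg h, ih]
      simp only [PySem.Str.isIn] at h
      simp [h]

theorem detect_math_domain_eq_alt (problem_text : String) :
    detect_math_domain problem_text = detect_math_domain_alt problem_text := by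
  unfold detect_math_domain detect_math_domain_alt pvKeywords
  simp only [List.foldl_append, pvFold_group]
  split_ifs <;> simp_all [pvMinOpt, pvLabels]

-- ===== VERDICT (by name: the statement is the Claim_ definition above) =====
theorem detect_math_domain_spec : Claim_equal_detect_math_domain := by
  intro p _
  exact detect_math_domain_eq_alt p
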